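-- pv_equiv track=rewrite | github.com/chryote/text-rpg | worldgen.py | GetNeighborsRadius
-- ===== SOURCE A (Python) =====
-- def GetNeighborsRadius(world, x, y, radius=2):
--     """
--     Return all tiles within Chebyshev distance `radius` (square neighborhood). Does not include center.
--     """
--     height = len(world)
--     width = len(world[0])
--     neighbors = []
--     for ny in range(max(0, y - radius), min(height, y + radius + 1)):
--         for nx in range(max(0, x - radius), min(width, x + radius + 1)):
--             if nx == x and ny == y:
--                 continue
--             neighbors.append(world[ny][nx])
--     return neighbors
-- ===== SOURCE B (Python) =====
-- def GetNeighborsRadius(world, x, y, radius=2):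
--     """
--     Return all tiles within Chebyshev distance `radius` (square neighborhood). Does not include center.
--     """
--     lowx = max(0, x - radius)
--     highx = max(lowx, min(len(world[0]), x + radius + 1))
--
--     def rowslice(ny):
--         row = world[ny]
--         if ny == y and lowx <= x < highx:
--             return row[lowx:x] + row[x + 1:highx]
--         return row[lowx:highx]
--
--     lowy = max(0, y - radius)
--     highy = min(len(world), y + radius + 1)
--     return [tile for ny in range(lowy, highy) for tile in rowslice(ny)]
-- ===== Notes on version B (the rewrite author's own statement) =====
-- stated objective: alternative
-- what changed: The inner per-cell loop with its center test disappears: column bounds are clamped once and each row contributes a single slice (the center row two slices around the excluded center).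
import Mathlib
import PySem

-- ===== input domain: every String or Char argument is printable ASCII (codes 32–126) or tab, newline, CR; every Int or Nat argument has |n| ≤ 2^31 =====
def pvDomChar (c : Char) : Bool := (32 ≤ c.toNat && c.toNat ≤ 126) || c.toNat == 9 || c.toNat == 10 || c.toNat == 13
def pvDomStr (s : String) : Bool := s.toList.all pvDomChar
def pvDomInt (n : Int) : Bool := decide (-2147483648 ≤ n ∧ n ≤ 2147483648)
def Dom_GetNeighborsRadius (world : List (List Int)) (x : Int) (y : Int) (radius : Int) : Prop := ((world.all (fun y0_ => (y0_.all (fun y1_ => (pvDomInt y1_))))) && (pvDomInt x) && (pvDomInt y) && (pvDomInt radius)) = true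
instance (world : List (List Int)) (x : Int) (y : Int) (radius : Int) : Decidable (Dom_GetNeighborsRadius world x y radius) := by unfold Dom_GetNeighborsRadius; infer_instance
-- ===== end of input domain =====

-- B replaces the inner per-cell loop and its center test with one clamped slice per row
-- (two slices around the center on the center row); same cost class, no speed claim.

-- ===== PORT A =====
def GetNeighborsRadius (world : List (List Int)) (x : Int) (y : Int) (radius : Int) : List Int :=
  let height : Int := world.length
  let width : Int := (PySem.List.pyGetD world 0 []).length
  (PySem.List.pyRange (max 0 (y - radius)) (min height (y + radius + 1))).foldl
    (fun neighbors ny =>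
      (PySem.List.pyRange (max 0 (x - radius)) (min width (x + radius + 1))).foldl
        (fun neighbors nx =>
          if nx = x ∧ ny = y then neighbors
          else neighbors ++ [PySem.List.pyGetD (PySem.List.pyGetD world ny []) nx 0])
        neighbors)
    []

-- ===== PORT B =====
def GetNeighborsRadius_alt (world : List (List Int)) (x : Int) (y : Int) (radius : Int) : List Int :=
  let lowx : Int := max 0 (x - radius)
  let highx : Int := max lowx (min ((PySem.List.pyGetD world 0 []).length : Int) (x + radius + 1))
  let rowslice : Int → List Int := fun ny =>
    let row := PySem.List.pyGetD world ny []
    if ny = y ∧ lowx ≤ x ∧ x < highx then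
      PySem.List.slice row (some lowx) (some x) ++ PySem.List.slice row (some (x + 1)) (some highx)
    else
      PySem.List.slice row (some lowx) (some highx)
  let lowy : Int := max 0 (y - radius)
  let highy : Int := min (world.length : Int) (y + radius + 1)
  (PySem.List.pyRange lowy highy).flatMap rowslice

-- ===== PRECONDITION & SPEC =====
-- Pre_ holds exactly where A returns: a nonempty world (A reads world[0]) whose rows inside
-- the scanned window are long enough for the scanned column range — elsewhere A raises IndexError.
def Pre_GetNeighborsRadius (world : List (List Int)) (x : Int) (y : Int) (radius : Int) : Prop :=
  world ≠ [] ∧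
  ∀ ny ∈ PySem.List.pyRange (max 0 (y - radius)) (min (world.length : Int) (y + radius + 1)),
    max 0 (x - radius) < min ((world.headD []).length : Int) (x + radius + 1) →
      min ((world.headD []).length : Int) (x + radius + 1) ≤ ((world.getD ny.toNat []).length : Int)

instance (world : List (List Int)) (x : Int) (y : Int) (radius : Int) : Decidable (Pre_GetNeighborsRadius world x y radius) := by unfold Pre_GetNeighborsRadius; infer_instance

def pvWitness_GetNeighborsRadius : List (List Int) × Int × Int × Int := ([[1, 2], [3, 4]], 0, 0, 1)

def Spec_GetNeighborsRadius (world : List (List Int)) (x : Int) (y : Int) (radius : Int) (out : List Int) : Prop := out = GetNeighborsRadius_alt world x y radius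
instance (world : List (List Int)) (x : Int) (y : Int) (radius : Int) (out : List Int) : Decidable (Spec_GetNeighborsRadius world x y radius out) := by unfold Spec_GetNeighborsRadius; infer_instance

-- ===== CLAIM (what is proved, stated in full; the proofs are below) =====
def Claim_equal_GetNeighborsRadius : Prop := ∀ (world : List (List Int)) (x : Int) (y : Int) (radius : Int), Dom_GetNeighborsRadius world x y radius → Pre_GetNeighborsRadius world x y radius → Spec_GetNeighborsRadius world x y radius (GetNeighborsRadius world x y radius)


-- ===== LEMMAS AND PROOFS =====

-- range(a, b) never reaches below a, so clamping the stop at a does not change it.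
lemma pyRange_stop_max (a b : Int) : PySem.List.pyRange a b = PySem.List.pyRange a (max a b) := by
  by_cases h : b ≤ a
  · rw [PySem.List.pyRange_one_eq_nil h, PySem.List.pyRange_one_eq_nil (by omega)]
  · rw [max_eq_right (by omega : a ≤ b)]

-- A fold over range(a, b) that appends row[i] at each i is the slice row[a:b].
lemma fold_get_eq_slice (row : List Int) (b : Int) (hb0 : 0 ≤ b) (hb : b ≤ (row.length : Int)) :
    ∀ (n : Nat) (a : Int) (acc : List Int), 0 ≤ a → (b - a).toNat = n →
      (PySem.List.pyRange a b).foldl (fun s i => s ++ [PySem.List.pyGetD row i 0]) acc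
        = acc ++ PySem.List.slice row (some a) (some b) := by
  intro n
  induction n with
  | zero =>
      intro a acc ha hn
      have hba : b ≤ a := by omega
      rw [PySem.List.pyRange_one_eq_nil hba, PySem.List.slice_toNat row ha hb0]
      have : b.toNat - a.toNat = 0 := by omega
      simp [List.foldl, this]
  | succ n ih =>
      intro a acc ha hn
      have hab : a < b := by omega
      rw [PySem.List.pyRange_one_cons hab]
      rw [List.foldl_cons]
      rw [ih (a + 1) (acc ++ [PySem.List.pyGetD row a 0]) (by omega) (by omega)]
      have hlt : a.toNat < row.length := by omega
      rw [PySem.List.pyGetD_eq_getElem row 0 ha (by omega)]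
      rw [PySem.List.slice_toNat row ha hb0, PySem.List.slice_toNat row (by omega : (0:Int) ≤ a + 1) hb0]
      have h1 : (a + 1).toNat = a.toNat + 1 := by omega
      have h2 : b.toNat - a.toNat = (b.toNat - (a.toNat + 1)) + 1 := by omega
      rw [h1, h2, ← List.getElem_cons_drop hlt, List.take_succ_cons, List.append_assoc]
      simp

-- The center row: range(lowx, highx) skipping x yields row[lowx:x] ++ row[x+1:highx].
lemma fold_center (row : List Int) (x lowx highx : Int) (h0 : 0 ≤ lowx) (hlx : lowx ≤ x)
    (hxh : x < highx) (hh : highx ≤ (row.length : Int)) (acc : List Int) :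
    (PySem.List.pyRange lowx highx).foldl
        (fun s i => if i = x then s else s ++ [PySem.List.pyGetD row i 0]) acc
      = acc ++ PySem.List.slice row (some lowx) (some x)
            ++ PySem.List.slice row (some (x + 1)) (some highx) := by
  rw [PySem.List.pyRange_one_append lowx x highx hlx (le_of_lt hxh),
      PySem.List.pyRange_one_append x (x + 1) highx (by omega) (by omega),
      PySem.List.pyRange_one_singleton]
  rw [List.foldl_append, List.foldl_append]
  rw [PySem.List.foldl_congr_mem (PySem.List.pyRange lowx x) _
        (fun s i => s ++ [PySem.List.pyGetD row i 0]) acc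
        (by
          intro s i hi
          have := (PySem.List.mem_pyRange_one).mp hi
          rw [if_neg (by omega)])]
  rw [fold_get_eq_slice row x (by omega) (by omega) (x - lowx).toNat lowx acc h0 rfl]
  simp only [List.foldl_cons, List.foldl_nil, ite_true]
  rw [PySem.List.foldl_congr_mem (PySem.List.pyRange (x + 1) highx) _
        (fun s i => s ++ [PySem.List.pyGetD row i 0]) _
        (by
          intro s i hi
          have := (PySem.List.mem_pyRange_one).mp hi
          rw [if_neg (by omega)])]
  rw [fold_get_eq_slice row highx (by omega) hh (highx - (x + 1)).toNat (x + 1) _ (by omega) rfl]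

-- ===== VERDICT (by name: the statement is the Claim_ definition above) =====
theorem GetNeighborsRadius_spec : Claim_equal_GetNeighborsRadius := by
  intro world x y radius _ hpre
  obtain ⟨hne, hlen⟩ := hpre
  unfold Spec_GetNeighborsRadius GetNeighborsRadius GetNeighborsRadius_alt
  simp only []
  have hw0 : PySem.List.pyGetD world 0 [] = world.headD [] := by
    cases world with
    | nil => exact absurd rfl hne
    | cons h t => simp [PySem.List.pyGetD_zero]
  set W : Int := ((PySem.List.pyGetD world 0 []).length : Int) with hW
  set L : Int := max 0 (x - radius) with hL
  set HA : Int := min W (x + radius + 1) with hHA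
  set H : Int := max L HA with hH
  rw [show PySem.List.pyRange L HA = PySem.List.pyRange L H from pyRange_stop_max L HA]
  conv_rhs => rw [← List.nil_append (List.flatMap _ _), ← PySem.List.foldl_append_eq_flatMap]
  apply PySem.List.foldl_congr_mem
  intro acc ny hny
  have hnyr := (PySem.List.mem_pyRange_one).mp hny
  have hny0 : 0 ≤ ny := by omega
  have hnyh : ny < (world.length : Int) := by omega
  have hWh : W = ((world.headD []).length : Int) := by rw [hW, hw0]
  have hrowlen : L < HA → HA ≤ ((PySem.List.pyGetD world ny []).length : Int) := by
    intro hlh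
    have h2 := hlen ny hny (by omega)
    rw [List.getD_eq_getElem world [] (by omega)] at h2
    rw [PySem.List.pyGetD_eq_getElem world [] hny0 hnyh]
    omega
  have hL0 : 0 ≤ L := by omega
  by_cases hc : ny = y ∧ L ≤ x ∧ x < H
  · obtain ⟨hcy, hcl, hch⟩ := hc
    subst hcy
    rw [if_pos ⟨rfl, hcl, hch⟩]
    have hHeq : H = HA := by omega
    have hlh : L < HA := by omega
    rw [PySem.List.foldl_congr_mem _ _
          (fun s nx => if nx = x then s else s ++ [PySem.List.pyGetD (PySem.List.pyGetD world ny []) nx 0]) acc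
          (by intro s nx _; by_cases h : nx = x <;> simp [h])]
    rw [fold_center _ x _ _ hL0 hcl hch (by have := hrowlen hlh; omega) acc, List.append_assoc]
  · rw [if_neg hc]
    rw [PySem.List.foldl_congr_mem _ _
          (fun s nx => s ++ [PySem.List.pyGetD (PySem.List.pyGetD world ny []) nx 0]) acc
          (by
            intro s nx hnx
            have hnxr := (PySem.List.mem_pyRange_one).mp hnx
            rw [if_neg (by
              rintro ⟨h1, h2⟩
              exact hc ⟨h2, by omega, by omega⟩)])]
    by_cases hLH : L < H
    · have hHeq : H = HA := by omega
      exact fold_get_eq_slice _ _ (by omega) (by have := hrowlen (by omega); omega) _ _ acc hL0 rfl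
    · have hHeq : H = L := by omega
      rw [hHeq, PySem.List.pyRange_one_eq_nil (le_refl L),
          PySem.List.slice_toNat _ hL0 hL0]
      simp
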